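-- pv_equiv track=rewrite | github.com/Albertree/SOAR-ARC-test | procedural_memory/base_rules/_primitives.py | remove_noise_keep_blocks
-- ===== SOURCE A (Python) =====
-- def remove_noise_keep_blocks(grid, bg=0):
--     """Remove colored pixels that lack both a horizontal and vertical
--     same-color neighbor. Keeps only pixels that are part of solid blocks."""
--     h = len(grid)
--     w = len(grid[0]) if grid else 0
--     output = [[bg]*w for _ in range(h)]
--     for r in range(h):
--         for c in range(w):
--             v = grid[r][c]
--             if v == bg:
--                 continue
--             has_h = ((c > 0 and grid[r][c-1] == v) or
--                      (c < w-1 and grid[r][c+1] == v))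
--             has_v = ((r > 0 and grid[r-1][c] == v) or
--                      (r < h-1 and grid[r+1][c] == v))
--             if has_h and has_v:
--                 output[r][c] = v
--     return output
-- ===== SOURCE B (Python) =====
-- def remove_noise_keep_blocks(grid, bg=0):
--     """Edge-based re-implementation: clip rows to the grid's nominal width,
--     enumerate adjacent equal pairs (the 'edges' of the grid graph) once,
--     collect their endpoints in coordinate sets, then emit a cell iff it is
--     non-bg and lies on both a horizontal and a vertical edge."""
--     w = len(grid[0]) if grid else 0
--     rows = [row[:w] for row in grid]
--     horiz = set()
--     for r, row in enumerate(rows):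
--         for c, (a, b) in enumerate(zip(row, row[1:])):
--             if a == b:
--                 horiz.add((r, c))
--                 horiz.add((r, c + 1))
--     vert = set()
--     for r, (up, down) in enumerate(zip(rows, rows[1:])):
--         for c, (a, b) in enumerate(zip(up, down)):
--             if a == b:
--                 vert.add((r, c))
--                 vert.add((r + 1, c))
--     return [[v if v != bg and (r, c) in horiz and (r, c) in vert else bg
--              for c, v in enumerate(row)]
--             for r, row in enumerate(rows)]
-- ===== Notes on version B (the rewrite author's own statement) =====
-- stated objective: alternative
-- what changed: A tests all four neighbors of every cell inline while mutating a preallocated output; B never tests a cell's neighbors: after clipping rows to the nominal width w=len(grid[0]) it enumerates the grid's adjacent-equal PAIRS (edges) once via zips of shifted rows/columns, collects edge endpoints into horizontal/vertical coordinate sets, and emits a cell iff it is non-bg and a member of both sets, with no border conditions at all.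
import Mathlib
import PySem

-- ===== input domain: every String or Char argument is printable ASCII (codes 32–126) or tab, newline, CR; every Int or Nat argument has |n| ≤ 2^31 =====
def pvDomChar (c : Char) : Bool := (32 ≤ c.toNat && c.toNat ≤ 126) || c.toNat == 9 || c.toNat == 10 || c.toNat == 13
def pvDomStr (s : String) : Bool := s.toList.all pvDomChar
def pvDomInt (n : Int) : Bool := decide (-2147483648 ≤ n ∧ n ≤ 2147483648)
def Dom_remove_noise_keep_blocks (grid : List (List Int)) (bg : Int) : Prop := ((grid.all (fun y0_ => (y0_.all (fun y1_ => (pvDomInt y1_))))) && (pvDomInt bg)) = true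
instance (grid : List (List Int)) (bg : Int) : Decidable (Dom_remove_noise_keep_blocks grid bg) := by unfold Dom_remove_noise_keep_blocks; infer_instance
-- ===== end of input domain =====

-- ===== PORT A =====
-- B clips rows to the nominal width and replaces A's per-cell four-neighbor test by one enumeration
-- of the grid's adjacent-equal pairs (edges), collected into horizontal/vertical coordinate sets
-- (alternative algorithm, same cost).
-- grid[r][c] as read by A (indices in range on every admitted input)
def pvAGet (grid : List (List Int)) (r c : Int) : Int :=
  PySem.List.pyGetD (PySem.List.pyGetD grid r []) c 0

def remove_noise_keep_blocks (grid : List (List Int)) (bg : Int) : List (List Int) :=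
  let h : Int := grid.length
  let w : Int := if grid = [] then 0 else ((grid.headD []).length : Int)
  let output := (PySem.List.pyRange 0 h 1).map (fun _ => (PySem.List.pyRange 0 w 1).map (fun _ => bg))
  (PySem.List.pyRange 0 h 1).foldl (fun out r =>
    (PySem.List.pyRange 0 w 1).foldl (fun out c =>
      let v := pvAGet grid r c
      if v = bg then out
      else
        let has_h := (decide (c > 0) && decide (pvAGet grid r (c-1) = v)) ||
                     (decide (c < w-1) && decide (pvAGet grid r (c+1) = v))
        let has_v := (decide (r > 0) && decide (pvAGet grid (r-1) c = v)) ||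
                     (decide (r < h-1) && decide (pvAGet grid (r+1) c = v))
        if has_h && has_v then out.set r.toNat ((out.getD r.toNat []).set c.toNat v) else out)
      out) output

-- ===== PORT B =====
-- horiz: for r, row in enumerate(grid): for c, (a, b) in enumerate(zip(row, row[1:])): if a == b: add (r,c),(r,c+1)
def pvHset (grid : List (List Int)) : PySem.Set (Int × Int) :=
  (PySem.List.enumerate grid 0).foldl (fun s x =>
    (PySem.List.enumerate (x.2.zip (PySem.List.slice x.2 (some 1) none)) 0).foldl
      (fun s y => if decide (y.2.1 = y.2.2)
                  then PySem.Set.add (PySem.Set.add s (x.1, y.1)) (x.1, y.1 + 1) else s) s)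
    PySem.Set.empty

-- vert: for r, (up, down) in enumerate(zip(grid, grid[1:])): for c, (a, b) in enumerate(zip(up, down)): if a == b: add (r,c),(r+1,c)
def pvVset (grid : List (List Int)) : PySem.Set (Int × Int) :=
  (PySem.List.enumerate (grid.zip (PySem.List.slice grid (some 1) none)) 0).foldl (fun s x =>
    (PySem.List.enumerate (x.2.1.zip x.2.2) 0).foldl
      (fun s y => if decide (y.2.1 = y.2.2)
                  then PySem.Set.add (PySem.Set.add s (x.1, y.1)) (x.1 + 1, y.1) else s) s)
    PySem.Set.empty

def remove_noise_keep_blocks_alt (grid : List (List Int)) (bg : Int) : List (List Int) :=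
  let w : Int := if grid = [] then 0 else ((grid.headD []).length : Int)
  let rows := grid.map (fun row => PySem.List.slice row none (some w))
  let horiz := pvHset rows
  let vert := pvVset rows
  (PySem.List.enumerate rows 0).map (fun rrow =>
    (PySem.List.enumerate rrow.2 0).map (fun cv =>
      if decide (cv.2 ≠ bg) && PySem.Set.contains horiz (rrow.1, cv.1) &&
         PySem.Set.contains vert (rrow.1, cv.1)
      then cv.2 else bg))

-- ===== PRECONDITION & SPEC =====
-- Pre_ excludes exactly the grids with a row shorter than the first row: on those A raises
-- IndexError (it reads every cell up to w = len(grid[0])); B returns a value there.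
def Pre_remove_noise_keep_blocks (grid : List (List Int)) (bg : Int) : Prop :=
  ∀ row ∈ grid, (grid.headD []).length ≤ row.length
instance (grid : List (List Int)) (bg : Int) : Decidable (Pre_remove_noise_keep_blocks grid bg) := by
  unfold Pre_remove_noise_keep_blocks; infer_instance

def pvWitness_remove_noise_keep_blocks : List (List Int) × Int := ([[1, 1, 0], [1, 1, 2]], 0)

def Spec_remove_noise_keep_blocks (grid : List (List Int)) (bg : Int) (out : List (List Int)) : Prop := out = remove_noise_keep_blocks_alt grid bg
instance (grid : List (List Int)) (bg : Int) (out : List (List Int)) : Decidable (Spec_remove_noise_keep_blocks grid bg out) := by unfold Spec_remove_noise_keep_blocks; infer_instance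

-- ===== CLAIM (what is proved, stated in full; the proofs are below) =====
def Claim_equal_remove_noise_keep_blocks : Prop := ∀ (grid : List (List Int)) (bg : Int), Dom_remove_noise_keep_blocks grid bg → Pre_remove_noise_keep_blocks grid bg → Spec_remove_noise_keep_blocks grid bg (remove_noise_keep_blocks grid bg)

-- ===== LEMMAS AND PROOFS =====

-- width as port A computes it
def pvW (grid : List (List Int)) : Int := if grid = [] then 0 else ((grid.headD []).length : Int)

-- B's clipped rows and its core passes (proof-side names for alt's let-bound stages)
def pvCrop (grid : List (List Int)) : List (List Int) :=
  grid.map (fun row => PySem.List.slice row none (some (pvW grid)))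

def pvBcore (g : List (List Int)) (bg : Int) : List (List Int) :=
  (PySem.List.enumerate g 0).map (fun rrow =>
    (PySem.List.enumerate rrow.2 0).map (fun cv =>
      if decide (cv.2 ≠ bg) && PySem.Set.contains (pvHset g) (rrow.1, cv.1) &&
         PySem.Set.contains (pvVset g) (rrow.1, cv.1)
      then cv.2 else bg))

lemma pvAlt_eq (grid : List (List Int)) (bg : Int) :
    remove_noise_keep_blocks_alt grid bg = pvBcore (pvCrop grid) bg := rfl

-- the per-cell write condition of port A, factored out
def pvPA (grid : List (List Int)) (bg h w r c : Int) : Bool :=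
  let v := pvAGet grid r c
  !decide (v = bg) &&
  (((decide (c > 0) && decide (pvAGet grid r (c-1) = v)) ||
    (decide (c < w-1) && decide (pvAGet grid r (c+1) = v))) &&
   ((decide (r > 0) && decide (pvAGet grid (r-1) c = v)) ||
    (decide (r < h-1) && decide (pvAGet grid (r+1) c = v))))

def pvRowStep (grid : List (List Int)) (bg h w r : Int) (row : List Int) (c : Int) : List Int :=
  if pvPA grid bg h w r c then row.set c.toNat (pvAGet grid r c) else row

def pvMatStep (grid : List (List Int)) (bg h w : Int) (out : List (List Int)) (r : Int) : List (List Int) :=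
  (PySem.List.pyRange 0 w 1).foldl (fun out c =>
    if pvPA grid bg h w r c then out.set r.toNat ((out.getD r.toNat []).set c.toNat (pvAGet grid r c)) else out) out

lemma pvGetD_set_eq {α : Type} (l : List α) (i j : Nat) (a d : α) :
    (l.set i a).getD j d = if i = j ∧ i < l.length then a else l.getD j d := by
  simp only [List.getD_eq_getElem?_getD, List.getElem?_set]
  split_ifs with h1 h2 h3 h4 <;> simp_all <;> omega

lemma pvFoldl_length_inv {α β : Type} (step : List α → β → List α)
    (h : ∀ acc b, (step acc b).length = acc.length) (cs : List β) :
    ∀ xs : List α, (cs.foldl step xs).length = xs.length := by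
  induction cs with
  | nil => intro xs; rfl
  | cons c cs ih => intro xs; simp only [List.foldl_cons]; rw [ih, h]

lemma pvRowStep_length (grid : List (List Int)) (bg h w r : Int) (row : List Int) (c : Int) :
    (pvRowStep grid bg h w r row c).length = row.length := by
  unfold pvRowStep; split <;> simp

lemma pvMatStep_length (grid : List (List Int)) (bg h w : Int) (out : List (List Int)) (r : Int) :
    (pvMatStep grid bg h w out r).length = out.length := by
  unfold pvMatStep
  exact pvFoldl_length_inv _ (fun acc c => by split <;> simp) _ out

-- port A is the fold of pvMatStep
lemma pvA_eq_fold (grid : List (List Int)) (bg : Int) :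
    remove_noise_keep_blocks grid bg =
    (PySem.List.pyRange 0 (grid.length : Int) 1).foldl
      (pvMatStep grid bg (grid.length : Int) (pvW grid))
      ((PySem.List.pyRange 0 (grid.length : Int) 1).map
        (fun _ => (PySem.List.pyRange 0 (pvW grid) 1).map (fun _ => bg))) := by
  simp only [remove_noise_keep_blocks, pvW]
  congr 1
  funext out r
  simp only [pvMatStep]
  congr 1
  funext out c
  simp only [pvPA]
  by_cases hv : pvAGet grid r c = bg
  · simp [hv]
  · simp [hv]

-- a fold that only sets row rn equals setting row rn to the corresponding row fold
lemma pvFoldl_set_row (grid : List (List Int)) (bg h w r : Int) (rn : Nat) (hr : r.toNat = rn) :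
    ∀ (cs : List Int) (m : List (List Int)), rn < m.length →
    cs.foldl (fun out c =>
        if pvPA grid bg h w r c then out.set r.toNat ((out.getD r.toNat []).set c.toNat (pvAGet grid r c)) else out) m
    = m.set rn (cs.foldl (pvRowStep grid bg h w r) (m.getD rn [])) := by
  subst hr
  intro cs
  induction cs with
  | nil =>
    intro m hm
    simp only [List.foldl_nil]
    rw [List.getD_eq_getElem _ _ hm, List.set_getElem_self]
  | cons c cs ih =>
    intro m hm
    simp only [List.foldl_cons, pvRowStep]
    by_cases hp : pvPA grid bg h w r c = true
    · simp only [hp, if_true]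
      rw [ih _ (by simpa using hm)]
      rw [List.set_set]
      congr 1
      rw [pvGetD_set_eq]
      simp [hm]
    · simp only [hp]
      exact ih m hm

lemma pvMatStep_noop (grid : List (List Int)) (bg h w r : Int) (m : List (List Int))
    (hr : m.length ≤ r.toNat) : pvMatStep grid bg h w m r = m := by
  unfold pvMatStep
  generalize PySem.List.pyRange 0 w 1 = cs
  induction cs generalizing m with
  | nil => rfl
  | cons c cs ih =>
    simp only [List.foldl_cons]
    have hset : (m.set r.toNat ((m.getD r.toNat []).set c.toNat (pvAGet grid r c))) = m :=
      List.set_eq_of_length_le hr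
    split
    · rw [hset]; exact ih m hr
    · exact ih m hr

lemma pvOuter_length (grid : List (List Int)) (bg h w : Int) (rs : List Int) (m : List (List Int)) :
    (rs.foldl (pvMatStep grid bg h w) m).length = m.length :=
  pvFoldl_length_inv _ (fun acc r => pvMatStep_length grid bg h w acc r) rs m

lemma pvOuter_getD (grid : List (List Int)) (bg h w : Int) (n : Nat) :
    ∀ (m : List (List Int)) (j : Nat), j < m.length →
    ((PySem.List.pyRange 0 (n : Int) 1).foldl (pvMatStep grid bg h w) m).getD j []
    = if j < n then (PySem.List.pyRange 0 w 1).foldl (pvRowStep grid bg h w (j : Int)) (m.getD j [])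
      else m.getD j [] := by
  induction n with
  | zero =>
    intro m j hj
    rw [Nat.cast_zero, PySem.List.pyRange_one_eq_nil (le_refl 0)]
    simp
  | succ n ih =>
    intro m j hj
    have hcast : ((n+1 : Nat) : Int) = (n : Int) + 1 := by push_cast; ring
    rw [hcast, PySem.List.pyRange_one_succ_right (by positivity), List.foldl_append]
    simp only [List.foldl_cons, List.foldl_nil]
    have hplen : ((PySem.List.pyRange 0 (n : Int) 1).foldl (pvMatStep grid bg h w) m).length = m.length :=
      pvOuter_length grid bg h w _ m
    by_cases hn : n < m.length
    · rw [pvMatStep, pvFoldl_set_row grid bg h w (n : Int) n (by simp) _ _ (by omega)]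
      rw [pvGetD_set_eq]
      rw [ih m j hj]
      simp only [hplen]
      by_cases hjn : j = n
      · subst hjn
        rw [if_pos ⟨rfl, hj⟩, if_pos (by omega : j < j + 1)]
        congr 1
        rw [ih m j hj, if_neg (by omega : ¬ j < j)]
      · rw [if_neg (fun hc => hjn hc.1.symm)]
        simp only [show (j < n + 1) ↔ (j < n) from by omega]
    · rw [pvMatStep_noop grid bg h w (n : Int) _
        (by rw [hplen]; simp only [Int.toNat_natCast]; omega)]
      rw [ih m j hj]
      rw [if_pos (by omega : j < n), if_pos (by omega : j < n + 1)]

lemma pvRowFold_getD (grid : List (List Int)) (bg h w r : Int) (n : Nat) :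
    ∀ (row : List Int) (j : Nat), j < row.length →
    ((PySem.List.pyRange 0 (n : Int) 1).foldl (pvRowStep grid bg h w r) row).getD j 0
    = if j < n ∧ pvPA grid bg h w r (j : Int) = true then pvAGet grid r (j : Int) else row.getD j 0 := by
  induction n with
  | zero =>
    intro row j hj
    rw [Nat.cast_zero, PySem.List.pyRange_one_eq_nil (le_refl 0)]
    simp
  | succ n ih =>
    intro row j hj
    have hcast : ((n+1 : Nat) : Int) = (n : Int) + 1 := by push_cast; ring
    rw [hcast, PySem.List.pyRange_one_succ_right (by positivity), List.foldl_append]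
    simp only [List.foldl_cons, List.foldl_nil]
    have hplen : ((PySem.List.pyRange 0 (n : Int) 1).foldl (pvRowStep grid bg h w r) row).length = row.length :=
      pvFoldl_length_inv _ (fun acc c => pvRowStep_length grid bg h w r acc c) _ row
    rw [pvRowStep]
    by_cases hp : pvPA grid bg h w r (n : Int) = true
    · rw [if_pos hp, pvGetD_set_eq, ih row j hj]
      simp only [hplen]
      by_cases hjn : j = n
      · subst hjn
        rw [if_pos ⟨rfl, hj⟩, if_pos ⟨by omega, hp⟩]
      · rw [if_neg (fun hc => hjn hc.1.symm)]
        simp only [show (j < n + 1) ↔ (j < n) from by omega]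
    · rw [if_neg hp, ih row j hj]
      by_cases hjn : j = n
      · subst hjn
        rw [if_neg (by omega : ¬ (j < j ∧ pvPA grid bg h w r (j:Int) = true)),
            if_neg (fun hc => hp hc.2)]
      · simp only [show (j < n + 1) ↔ (j < n) from by omega]

-- membership in the edge-collecting inner fold
lemma pvMem_inner {β : Type} (P : β → Bool) (f g : β → Int × Int) (l : List β) :
    ∀ (s : PySem.Set (Int × Int)) (p : Int × Int),
    p ∈ l.foldl (fun s y => if P y then PySem.Set.add (PySem.Set.add s (f y)) (g y) else s) s ↔
    p ∈ s ∨ ∃ y ∈ l, P y = true ∧ (p = f y ∨ p = g y) := by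
  induction l with
  | nil => intro s p; simp
  | cons y l ih =>
    intro s p
    simp only [List.foldl_cons]
    by_cases hp : P y = true
    · rw [if_pos hp, ih]
      simp only [PySem.Set.mem_add, List.mem_cons]
      constructor
      · rintro (((h | h) | h) | ⟨z, hz, hPz, hfz⟩)
        · exact Or.inl h
        · exact Or.inr ⟨y, Or.inl rfl, hp, Or.inl h⟩
        · exact Or.inr ⟨y, Or.inl rfl, hp, Or.inr h⟩
        · exact Or.inr ⟨z, Or.inr hz, hPz, hfz⟩
      · rintro (h | ⟨z, (rfl | hz), hPz, hfz⟩)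
        · exact Or.inl (Or.inl (Or.inl h))
        · rcases hfz with h | h
          · exact Or.inl (Or.inl (Or.inr h))
          · exact Or.inl (Or.inr h)
        · exact Or.inr ⟨z, hz, hPz, hfz⟩
    · rw [if_neg hp, ih]
      constructor
      · rintro (h | ⟨z, hz, hPz, hfz⟩)
        · exact Or.inl h
        · exact Or.inr ⟨z, List.mem_cons_of_mem _ hz, hPz, hfz⟩
      · rintro (h | ⟨z, hz, hPz, hfz⟩)
        · exact Or.inl h
        · rcases List.mem_cons.mp hz with rfl | hz
          · exact absurd hPz hp
          · exact Or.inr ⟨z, hz, hPz, hfz⟩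

-- membership in the nested edge-collecting fold
lemma pvMem_outer {β γ : Type} (hlist : β → List γ) (P : β → γ → Bool) (f g : β → γ → Int × Int)
    (l : List β) :
    ∀ (s : PySem.Set (Int × Int)) (p : Int × Int),
    p ∈ l.foldl (fun s x => (hlist x).foldl
        (fun s y => if P x y then PySem.Set.add (PySem.Set.add s (f x y)) (g x y) else s) s) s ↔
    p ∈ s ∨ ∃ x ∈ l, ∃ y ∈ hlist x, P x y = true ∧ (p = f x y ∨ p = g x y) := by
  induction l with
  | nil => intro s p; simp
  | cons x l ih =>
    intro s p
    simp only [List.foldl_cons]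
    rw [ih, pvMem_inner]
    simp only [List.mem_cons]
    constructor
    · rintro ((h | ⟨y, hy, hP, hf⟩) | ⟨z, hz, y, hy, hP, hf⟩)
      · exact Or.inl h
      · exact Or.inr ⟨x, Or.inl rfl, y, hy, hP, hf⟩
      · exact Or.inr ⟨z, Or.inr hz, y, hy, hP, hf⟩
    · rintro (h | ⟨z, (rfl | hz), y, hy, hP, hf⟩)
      · exact Or.inl (Or.inl h)
      · exact Or.inl (Or.inr ⟨y, hy, hP, hf⟩)
      · exact Or.inr ⟨z, hz, y, hy, hP, hf⟩

lemma pvMem_enumerate {α : Type} (l : List α) (x : Int × α) :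
    x ∈ PySem.List.enumerate l 0 ↔ ∃ i : Nat, ∃ h : i < l.length, x = ((i : Int), l[i]) := by
  rw [List.mem_iff_getElem]
  constructor
  · rintro ⟨i, hi, hx⟩
    rw [PySem.List.length_enumerate] at hi
    refine ⟨i, hi, ?_⟩
    rw [← hx, PySem.List.getElem_enumerate, zero_add]
  · rintro ⟨i, hi, rfl⟩
    refine ⟨i, by simpa [PySem.List.length_enumerate] using hi, ?_⟩
    rw [PySem.List.getElem_enumerate, zero_add]

-- horizontal edge set membership, characterized as A's horizontal neighbor test
lemma pvHset_mem (grid : List (List Int))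
    (hpre : ∀ row ∈ grid, row.length = (grid.headD []).length)
    (r c : Nat) (hr : r < grid.length) (hc : c < (grid.headD []).length) :
    (((r : Int), (c : Int)) ∈ pvHset grid) ↔
    ((0 < c ∧ (grid.getD r []).getD (c-1) 0 = (grid.getD r []).getD c 0) ∨
     (c + 1 < (grid.headD []).length ∧ (grid.getD r []).getD (c+1) 0 = (grid.getD r []).getD c 0)) := by
  unfold pvHset
  rw [pvMem_outer]
  have hrowlen : ∀ (i : Nat) (h : i < grid.length), (grid[i]'h).length = (grid.headD []).length :=
    fun i h => hpre _ (List.getElem_mem h)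
  have hrl := hrowlen r hr
  constructor
  · rintro (h | ⟨x, hx, y, hy, hP, hf⟩)
    · simp [PySem.Set.empty] at h
    · obtain ⟨i, hi, rfl⟩ := (pvMem_enumerate _ _).mp hx
      rw [PySem.List.slice_from_one] at hy
      obtain ⟨j, hj, rfl⟩ := (pvMem_enumerate _ _).mp hy
      rw [List.length_zip, List.length_tail] at hj
      have hj2 : j < (grid[i]'hi).length - 1 := by
        have h' : j < min (grid[i]'hi).length ((grid[i]'hi).length - 1) := hj
        omega
      simp only [List.getElem_zip, List.getElem_tail, decide_eq_true_iff] at hP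
      have hP2 : (grid[i]'hi)[j]'(by omega) = (grid[i]'hi)[j+1]'(by omega) := hP
      have hlen := hrowlen i hi
      have h1 : (r : Int) = (i : Int) ∧ ((c : Int) = (j : Int) ∨ (c : Int) = (j : Int) + 1) := by
        rcases hf with h | h
        · have h' : ((r:Int),(c:Int)) = ((i:Int),(j:Int)) := h
          rw [Prod.mk.injEq] at h'
          exact ⟨h'.1, Or.inl h'.2⟩
        · have h' : ((r:Int),(c:Int)) = ((i:Int),(j:Int)+1) := h
          rw [Prod.mk.injEq] at h'
          exact ⟨h'.1, Or.inr h'.2⟩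
      have hri : r = i := by exact_mod_cast h1.1
      subst hri
      rcases h1.2 with hcj | hcj
      · have hcj' : c = j := by exact_mod_cast hcj
        subst hcj'
        right
        refine ⟨by omega, ?_⟩
        rw [List.getD_eq_getElem grid [] hr,
            List.getD_eq_getElem _ _ (by omega), List.getD_eq_getElem _ _ (by omega)]
        exact hP2.symm
      · have hcj' : c = j + 1 := by exact_mod_cast hcj
        subst hcj'
        left
        refine ⟨by omega, ?_⟩
        simp only [Nat.add_sub_cancel]
        rw [List.getD_eq_getElem grid [] hr,
            List.getD_eq_getElem _ _ (by omega), List.getD_eq_getElem _ _ (by omega)]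
        exact hP2
  · intro h
    right
    rw [List.getD_eq_getElem grid [] hr] at h
    rcases h with ⟨hc0, heq⟩ | ⟨hc1, heq⟩
    · have hB1 : c - 1 < (grid[r]'hr).length := by omega
      have hB2 : c < (grid[r]'hr).length := by omega
      rw [List.getD_eq_getElem _ _ hB1, List.getD_eq_getElem _ _ hB2] at heq
      refine ⟨((r : Int), grid[r]'hr), (pvMem_enumerate _ _).mpr ⟨r, hr, rfl⟩, ?_⟩
      rw [PySem.List.slice_from_one]
      have hzb : c - 1 < ((grid[r]'hr).zip (grid[r]'hr).tail).length := by
        rw [List.length_zip, List.length_tail]; omega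
      refine ⟨_, (pvMem_enumerate _ _).mpr ⟨c - 1, hzb, rfl⟩, ?_, ?_⟩
      · simp only [List.getElem_zip, List.getElem_tail, decide_eq_true_iff]
        have egoal : (grid[r]'hr)[c-1]'(by omega) = (grid[r]'hr)[c-1+1]'(by omega) := by
          simp only [show c - 1 + 1 = c from by omega]
          exact heq
        exact egoal
      · right
        rw [Prod.mk.injEq]
        exact ⟨rfl, by omega⟩
    · have hB1 : c + 1 < (grid[r]'hr).length := by omega
      have hB2 : c < (grid[r]'hr).length := by omega
      rw [List.getD_eq_getElem _ _ hB1, List.getD_eq_getElem _ _ hB2] at heq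
      refine ⟨((r : Int), grid[r]'hr), (pvMem_enumerate _ _).mpr ⟨r, hr, rfl⟩, ?_⟩
      rw [PySem.List.slice_from_one]
      have hzb : c < ((grid[r]'hr).zip (grid[r]'hr).tail).length := by
        rw [List.length_zip, List.length_tail]; omega
      refine ⟨_, (pvMem_enumerate _ _).mpr ⟨c, hzb, rfl⟩, ?_, ?_⟩
      · simp only [List.getElem_zip, List.getElem_tail, decide_eq_true_iff]
        exact heq.symm
      · exact Or.inl rfl

-- vertical edge set membership, characterized as A's vertical neighbor test
lemma pvVset_mem (grid : List (List Int))
    (hpre : ∀ row ∈ grid, row.length = (grid.headD []).length)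
    (r c : Nat) (hr : r < grid.length) (hc : c < (grid.headD []).length) :
    (((r : Int), (c : Int)) ∈ pvVset grid) ↔
    ((0 < r ∧ (grid.getD (r-1) []).getD c 0 = (grid.getD r []).getD c 0) ∨
     (r + 1 < grid.length ∧ (grid.getD (r+1) []).getD c 0 = (grid.getD r []).getD c 0)) := by
  unfold pvVset
  rw [pvMem_outer]
  have hrowlen : ∀ (i : Nat) (h : i < grid.length), (grid[i]'h).length = (grid.headD []).length :=
    fun i h => hpre _ (List.getElem_mem h)
  have hrl := hrowlen r hr
  constructor
  · rintro (h | ⟨x, hx, y, hy, hP, hf⟩)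
    · simp [PySem.Set.empty] at h
    · rw [PySem.List.slice_from_one] at hx
      obtain ⟨i, hi, rfl⟩ := (pvMem_enumerate _ _).mp hx
      rw [List.length_zip, List.length_tail] at hi
      have hi2 : i < grid.length - 1 := by omega
      simp only [List.getElem_zip, List.getElem_tail] at hy
      obtain ⟨j, hj, rfl⟩ := (pvMem_enumerate _ _).mp hy
      rw [List.length_zip] at hj
      have hl1 := hrowlen i (by omega)
      have hl2 := hrowlen (i+1) (by omega)
      have hj2 : j < (grid.headD []).length := by omega
      simp only [List.getElem_zip, decide_eq_true_iff] at hP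
      have hP2 : (grid[i]'(by omega))[j]'(by omega) = (grid[i+1]'(by omega))[j]'(by omega) := hP
      have h1 : ((r : Int) = (i : Int) ∨ (r : Int) = (i : Int) + 1) ∧ (c : Int) = (j : Int) := by
        rcases hf with h | h
        · have h' : ((r:Int),(c:Int)) = ((i:Int),(j:Int)) := h
          rw [Prod.mk.injEq] at h'
          exact ⟨Or.inl h'.1, h'.2⟩
        · have h' : ((r:Int),(c:Int)) = ((i:Int)+1,(j:Int)) := h
          rw [Prod.mk.injEq] at h'
          exact ⟨Or.inr h'.1, h'.2⟩
      have hcj : c = j := by exact_mod_cast h1.2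
      subst hcj
      rcases h1.1 with hri | hri
      · have hri' : r = i := by exact_mod_cast hri
        subst hri'
        right
        refine ⟨by omega, ?_⟩
        rw [List.getD_eq_getElem grid [] (show r + 1 < grid.length by omega),
            List.getD_eq_getElem grid [] hr,
            List.getD_eq_getElem _ _ (by omega), List.getD_eq_getElem _ _ (by omega)]
        exact hP2.symm
      · have hri' : r = i + 1 := by exact_mod_cast hri
        subst hri'
        left
        refine ⟨by omega, ?_⟩
        simp only [Nat.add_sub_cancel]
        rw [List.getD_eq_getElem grid [] (show i < grid.length by omega),
            List.getD_eq_getElem grid [] hr,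
            List.getD_eq_getElem _ _ (by omega), List.getD_eq_getElem _ _ (by omega)]
        exact hP2
  · intro h
    right
    rw [PySem.List.slice_from_one]
    rcases h with ⟨hr0, heq⟩ | ⟨hr1, heq⟩
    · have hA : r - 1 < grid.length := by omega
      have hBa : c < (grid[r-1]'hA).length := by have := hrowlen (r-1) hA; omega
      have hBb : c < (grid[r]'hr).length := by omega
      rw [List.getD_eq_getElem grid [] hA, List.getD_eq_getElem grid [] hr,
          List.getD_eq_getElem _ _ hBa, List.getD_eq_getElem _ _ hBb] at heq
      have hb : r - 1 < (grid.zip grid.tail).length := by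
        rw [List.length_zip, List.length_tail]; omega
      refine ⟨(((r-1 : Nat) : Int), (grid.zip grid.tail)[r-1]'hb),
        (pvMem_enumerate _ _).mpr ⟨r-1, hb, rfl⟩, ?_⟩
      simp only [List.getElem_zip, List.getElem_tail]
      refine ⟨_, (pvMem_enumerate _ _).mpr ⟨c, by
          have h1 := hrowlen (r-1) hA
          have h2 := hrowlen (r-1+1) (by omega)
          rw [List.length_zip]; omega, rfl⟩, ?_, ?_⟩
      · simp only [List.getElem_zip, decide_eq_true_iff]
        have egoal : (grid[r-1]'hA)[c]'hBa
            = (grid[r-1+1]'(by omega))[c]'(by have := hrowlen (r-1+1) (by omega); omega) := by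
          simp only [show r - 1 + 1 = r from by omega]
          exact heq
        exact egoal
      · right
        rw [Prod.mk.injEq]
        exact ⟨by omega, rfl⟩
    · have hA : r + 1 < grid.length := hr1
      have hBa : c < (grid[r]'hr).length := by omega
      have hBb : c < (grid[r+1]'hA).length := by have := hrowlen (r+1) hA; omega
      rw [List.getD_eq_getElem grid [] hA, List.getD_eq_getElem grid [] hr,
          List.getD_eq_getElem _ _ hBb, List.getD_eq_getElem _ _ hBa] at heq
      have hb : r < (grid.zip grid.tail).length := by
        rw [List.length_zip, List.length_tail]; omega
      refine ⟨((r : Int), (grid.zip grid.tail)[r]'hb),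
        (pvMem_enumerate _ _).mpr ⟨r, hb, rfl⟩, ?_⟩
      simp only [List.getElem_zip, List.getElem_tail]
      refine ⟨_, (pvMem_enumerate _ _).mpr ⟨c, by
          have h1 := hrowlen r hr
          have h2 := hrowlen (r+1) hA
          rw [List.length_zip]; omega, rfl⟩, ?_, ?_⟩
      · simp only [List.getElem_zip, decide_eq_true_iff]
        exact heq.symm
      · exact Or.inl rfl

-- A's write condition, re-indexed over Nat with the guarded casts resolved
lemma pvPA_nat (grid : List (List Int)) (bg w : Int) (r c : Nat) :
    pvPA grid bg (grid.length : Int) w (r : Int) (c : Int)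
    = (!decide ((grid.getD r []).getD c 0 = bg) &&
       (((decide ((c:Int) > 0) && decide ((grid.getD r []).getD (c-1) 0 = (grid.getD r []).getD c 0)) ||
         (decide ((c:Int) < w-1) && decide ((grid.getD r []).getD (c+1) 0 = (grid.getD r []).getD c 0))) &&
        ((decide ((r:Int) > 0) && decide ((grid.getD (r-1) []).getD c 0 = (grid.getD r []).getD c 0)) ||
         (decide ((r:Int) < (grid.length : Int)-1) && decide ((grid.getD (r+1) []).getD c 0 = (grid.getD r []).getD c 0))))) := by
  unfold pvPA pvAGet
  simp only [PySem.List.pyGetD_natCast]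
  have hcm : (decide ((c:Int) > 0) && decide (PySem.List.pyGetD (grid.getD r []) ((c:Int)-1) 0 = (grid.getD r []).getD c 0))
           = (decide ((c:Int) > 0) && decide ((grid.getD r []).getD (c-1) 0 = (grid.getD r []).getD c 0)) := by
    by_cases hc0 : 0 < c
    · rw [show ((c:Int) - 1) = ((c-1 : Nat) : Int) from by omega, PySem.List.pyGetD_natCast]
    · rw [show decide ((c:Int) > 0) = false from by apply decide_eq_false; omega,
          Bool.false_and, Bool.false_and]
  have hcp : PySem.List.pyGetD (grid.getD r []) ((c:Int)+1) 0 = (grid.getD r []).getD (c+1) 0 := by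
    rw [show ((c:Int) + 1) = ((c+1 : Nat) : Int) from by push_cast; ring, PySem.List.pyGetD_natCast]
  have hrm : (decide ((r:Int) > 0) && decide ((PySem.List.pyGetD grid ((r:Int)-1) []).getD c 0 = (grid.getD r []).getD c 0))
           = (decide ((r:Int) > 0) && decide ((grid.getD (r-1) []).getD c 0 = (grid.getD r []).getD c 0)) := by
    by_cases hr0 : 0 < r
    · rw [show ((r:Int) - 1) = ((r-1 : Nat) : Int) from by omega, PySem.List.pyGetD_natCast]
    · rw [show decide ((r:Int) > 0) = false from by apply decide_eq_false; omega,
          Bool.false_and, Bool.false_and]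
  have hrp : (PySem.List.pyGetD grid ((r:Int)+1) []).getD c 0 = (grid.getD (r+1) []).getD c 0 := by
    rw [show ((r:Int) + 1) = ((r+1 : Nat) : Int) from by push_cast; ring, PySem.List.pyGetD_natCast]
  rw [hcm, hcp, hrm, hrp]

-- clipping facts
lemma pvCrop_length (grid : List (List Int)) : (pvCrop grid).length = grid.length := by
  simp [pvCrop]

lemma pvCrop_getD (grid : List (List Int))
    (hpre : ∀ row ∈ grid, (grid.headD []).length ≤ row.length)
    (i c : Nat) (hc : c < (grid.headD []).length) :
    ((pvCrop grid).getD i []).getD c 0 = (grid.getD i []).getD c 0 := by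
  by_cases hg : grid = []
  · subst hg; simp at hc
  · by_cases hi : i < grid.length
    · have hW : pvW grid = (((grid.headD []).length : Nat) : Int) := if_neg hg
      have hlen : (grid.headD []).length ≤ (grid[i]'hi).length := hpre _ (List.getElem_mem hi)
      rw [List.getD_eq_getElem (pvCrop grid) [] (by rw [pvCrop_length]; exact hi),
          List.getD_eq_getElem grid [] hi]
      have hmap : pvCrop grid
          = grid.map (fun row => PySem.List.slice row none (some (((grid.headD []).length : Nat) : Int))) := by
        unfold pvCrop
        rw [hW]
      have hcrop : (pvCrop grid)[i]'(by rw [pvCrop_length]; exact hi)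
          = (grid[i]'hi).take (grid.headD []).length := by
        simp only [hmap, List.getElem_map]
        rw [PySem.List.slice_to_natCast]
      rw [hcrop]
      rw [List.getD_eq_getElem _ _ (by rw [List.length_take]; omega),
          List.getD_eq_getElem _ _ (by omega)]
      simp [List.getElem_take]
    · have e1 : (pvCrop grid).getD i [] = [] := by
        rw [List.getD_eq_getElem?_getD, List.getElem?_eq_none (by rw [pvCrop_length]; omega)]
        rfl
      have e2 : grid.getD i [] = [] := by
        rw [List.getD_eq_getElem?_getD, List.getElem?_eq_none (by omega)]
        rfl
      rw [e1, e2]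

lemma pvCrop_headD_len (grid : List (List Int)) (hg : grid ≠ [])
    (hpre : ∀ row ∈ grid, (grid.headD []).length ≤ row.length) :
    ((pvCrop grid).headD []).length = (grid.headD []).length := by
  obtain ⟨a, tl, rfl⟩ := List.exists_cons_of_ne_nil hg
  have hW : pvW (a :: tl) = ((((a :: tl).headD []).length : Nat) : Int) := if_neg (by simp)
  simp only [pvCrop, List.map_cons, List.headD_cons]
  rw [hW, PySem.List.slice_to_natCast, List.length_take]
  have := hpre a (by simp)
  simp only [List.headD_cons] at this ⊢
  omega

lemma pvCrop_rect (grid : List (List Int))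
    (hpre : ∀ row ∈ grid, (grid.headD []).length ≤ row.length) :
    ∀ row ∈ pvCrop grid, row.length = ((pvCrop grid).headD []).length := by
  intro row hm
  by_cases hg : grid = []
  · subst hg; simp [pvCrop] at hm
  · rw [pvCrop_headD_len grid hg hpre]
    simp only [pvCrop, List.mem_map] at hm
    obtain ⟨orow, hor, rfl⟩ := hm
    have hW : pvW grid = (((grid.headD []).length : Nat) : Int) := if_neg hg
    rw [hW, PySem.List.slice_to_natCast, List.length_take]
    have := hpre orow hor
    omega

lemma pvW_crop (grid : List (List Int)) (hg : grid ≠ [])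
    (hpre : ∀ row ∈ grid, (grid.headD []).length ≤ row.length) :
    pvW (pvCrop grid) = pvW grid := by
  rw [pvW, pvW, if_neg (show pvCrop grid ≠ [] by simp [pvCrop, hg]), if_neg hg,
      pvCrop_headD_len grid hg hpre]

lemma pvAGet_crop (grid : List (List Int))
    (hpre : ∀ row ∈ grid, (grid.headD []).length ≤ row.length)
    (r c : Nat) (hc : c < (grid.headD []).length) :
    pvAGet (pvCrop grid) (r : Int) (c : Int) = pvAGet grid (r : Int) (c : Int) := by
  unfold pvAGet
  simp only [PySem.List.pyGetD_natCast]
  exact pvCrop_getD grid hpre r c hc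

lemma pvPA_crop (grid : List (List Int)) (bg : Int)
    (hpre : ∀ row ∈ grid, (grid.headD []).length ≤ row.length)
    (r c : Nat) (hc : c < (grid.headD []).length) :
    pvPA (pvCrop grid) bg ((pvCrop grid).length : Int) (((grid.headD []).length : Nat) : Int) (r : Int) (c : Int)
    = pvPA grid bg (grid.length : Int) (((grid.headD []).length : Nat) : Int) (r : Int) (c : Int) := by
  rw [pvPA_nat, pvPA_nat, pvCrop_length]
  have hE := pvCrop_getD grid hpre
  rw [hE r c hc, hE (r-1) c hc, hE (r+1) c hc, hE r (c-1) (by omega)]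
  by_cases hlt : (c : Int) < (((grid.headD []).length : Nat) : Int) - 1
  · rw [hE r (c+1) (by omega)]
  · rw [show decide ((c : Int) < (((grid.headD []).length : Nat) : Int) - 1) = false from
        decide_eq_false hlt]
    simp only [Bool.false_and, Bool.or_false]

-- the cell of port B, characterized by A's write condition
lemma pvB_getD (grid : List (List Int)) (bg : Int)
    (hpre : ∀ row ∈ grid, row.length = (grid.headD []).length)
    (r c : Nat) (hr : r < grid.length) (hc : c < (grid.headD []).length) :
    ((pvBcore grid bg).getD r []).getD c 0
    = if pvPA grid bg (grid.length : Int) (pvW grid) (r : Int) (c : Int) = true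
      then pvAGet grid (r : Int) (c : Int) else bg := by
  have hgne : grid ≠ [] := by rintro rfl; simp at hr
  have hW : pvW grid = ((grid.headD []).length : Int) := if_neg hgne
  have hrowlen : (grid[r]'hr).length = (grid.headD []).length := hpre _ (List.getElem_mem hr)
  have hc' : c < (grid[r]'hr).length := by omega
  -- reduce B's nested map/enumerate to the concrete cell
  have hrow_eq : (pvBcore grid bg).getD r []
      = (PySem.List.enumerate (grid[r]'hr) 0).map (fun cv =>
          if decide (cv.2 ≠ bg) && PySem.Set.contains (pvHset grid) (0 + (r:Int), cv.1) &&
             PySem.Set.contains (pvVset grid) (0 + (r:Int), cv.1)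
          then cv.2 else bg) := by
    simp only [pvBcore]
    rw [List.getD_eq_getElem _ _ (by simpa [PySem.List.length_enumerate] using hr),
        List.getElem_map, PySem.List.getElem_enumerate]
  rw [hrow_eq]
  rw [List.getD_eq_getElem _ _ (by simpa [PySem.List.length_enumerate] using hc'),
      List.getElem_map, PySem.List.getElem_enumerate]
  simp only [zero_add]
  have hH : PySem.Set.contains (pvHset grid) ((r:Int), (c:Int))
      = ((decide ((c:Int) > 0) && decide ((grid.getD r []).getD (c-1) 0 = (grid.getD r []).getD c 0)) ||
         (decide ((c:Int) < ((grid.headD []).length : Int)-1) && decide ((grid.getD r []).getD (c+1) 0 = (grid.getD r []).getD c 0))) := by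
    apply Bool.eq_iff_iff.mpr
    rw [PySem.Set.contains_iff, pvHset_mem grid hpre r c hr hc]
    simp only [Bool.or_eq_true, Bool.and_eq_true, decide_eq_true_iff,
               List.getD_eq_getElem grid [] hr]
    constructor
    · rintro (⟨h1, h2⟩ | ⟨h1, h2⟩)
      · exact Or.inl ⟨by exact_mod_cast h1, h2⟩
      · exact Or.inr ⟨by omega, h2⟩
    · rintro (⟨h1, h2⟩ | ⟨h1, h2⟩)
      · exact Or.inl ⟨by exact_mod_cast h1, h2⟩
      · exact Or.inr ⟨by omega, h2⟩
  have hV : PySem.Set.contains (pvVset grid) ((r:Int), (c:Int))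
      = ((decide ((r:Int) > 0) && decide ((grid.getD (r-1) []).getD c 0 = (grid.getD r []).getD c 0)) ||
         (decide ((r:Int) < (grid.length : Int)-1) && decide ((grid.getD (r+1) []).getD c 0 = (grid.getD r []).getD c 0))) := by
    apply Bool.eq_iff_iff.mpr
    rw [PySem.Set.contains_iff, pvVset_mem grid hpre r c hr hc]
    simp only [Bool.or_eq_true, Bool.and_eq_true, decide_eq_true_iff]
    constructor
    · rintro (⟨h1, h2⟩ | ⟨h1, h2⟩)
      · exact Or.inl ⟨by exact_mod_cast h1, h2⟩
      · exact Or.inr ⟨by omega, h2⟩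
    · rintro (⟨h1, h2⟩ | ⟨h1, h2⟩)
      · exact Or.inl ⟨by exact_mod_cast h1, h2⟩
      · exact Or.inr ⟨by omega, h2⟩
  rw [hH, hV, pvPA_nat, hW]
  simp only [pvAGet, PySem.List.pyGetD_natCast]
  simp only [List.getD_eq_getElem grid [] hr, List.getD_eq_getElem (grid[r]'hr) (0:Int) hc']
  simp only [decide_not, Bool.and_assoc]

-- ===== VERDICT (by name: the statement is the Claim_ definition above) =====
theorem remove_noise_keep_blocks_spec : Claim_equal_remove_noise_keep_blocks := by
  intro grid bg hdom hpre
  unfold Spec_remove_noise_keep_blocks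
  unfold Pre_remove_noise_keep_blocks at hpre
  rw [pvAlt_eq]
  have hGrect := pvCrop_rect grid hpre
  have hA_len : (remove_noise_keep_blocks grid bg).length = grid.length := by
    rw [pvA_eq_fold, pvOuter_length]
    simp [PySem.List.length_pyRange_one]
  have hB_len : (pvBcore (pvCrop grid) bg).length = grid.length := by
    simp [pvBcore, PySem.List.length_enumerate, pvCrop_length]
  apply List.ext_getElem (by rw [hA_len, hB_len])
  intro r h1 h2
  have hr : r < grid.length := by rw [hA_len] at h1; exact h1
  have hgne : grid ≠ [] := by rintro rfl; simp at hr
  have hGne : pvCrop grid ≠ [] := by simp [pvCrop, hgne]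
  have hGr : r < (pvCrop grid).length := by rw [pvCrop_length]; exact hr
  have hHD := pvCrop_headD_len grid hgne hpre
  have hWeq : pvW grid = (((grid.headD []).length : Nat) : Int) := if_neg hgne
  rw [← List.getD_eq_getElem _ [] h1, ← List.getD_eq_getElem _ [] h2]
  have hm0 : ((PySem.List.pyRange 0 ((grid.length : Nat) : Int) 1).map (fun _ => (PySem.List.pyRange 0 (pvW grid) 1).map (fun _ => bg))).length = grid.length := by
    simp [PySem.List.length_pyRange_one]
  have hinit : ((PySem.List.pyRange 0 ((grid.length : Nat) : Int) 1).map (fun _ => (PySem.List.pyRange 0 (pvW grid) 1).map (fun _ => bg))).getD r []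
      = (PySem.List.pyRange 0 (pvW grid) 1).map (fun _ => bg) := by
    rw [List.getD_eq_getElem _ _ (by rw [hm0]; exact hr), List.getElem_map]
  have hArow : (remove_noise_keep_blocks grid bg).getD r []
      = (PySem.List.pyRange 0 (pvW grid) 1).foldl (pvRowStep grid bg (grid.length : Int) (pvW grid) (r : Int)) ((PySem.List.pyRange 0 (pvW grid) 1).map (fun _ => bg)) := by
    rw [pvA_eq_fold, pvOuter_getD grid bg (grid.length : Int) (pvW grid) grid.length _ r (by rw [hm0]; exact hr), if_pos hr, hinit]
  have hbgrow_len : ((PySem.List.pyRange 0 (pvW grid) 1).map (fun _ => bg)).length = (grid.headD []).length := by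
    rw [hWeq]; simp [PySem.List.length_pyRange_one]
  have hAB_rowlen : ((remove_noise_keep_blocks grid bg).getD r []).length = (grid.headD []).length := by
    rw [hArow, pvFoldl_length_inv _ (fun acc c => pvRowStep_length _ _ _ _ _ acc c), hbgrow_len]
  have hGrowlen : ((pvCrop grid)[r]'hGr).length = (grid.headD []).length := by
    rw [hGrect _ (List.getElem_mem hGr), hHD]
  have hBrow_len : ((pvBcore (pvCrop grid) bg).getD r []).length = ((pvCrop grid)[r]'hGr).length := by
    simp only [pvBcore]
    rw [List.getD_eq_getElem _ _ (by simpa [PySem.List.length_enumerate, pvCrop_length] using hr),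
        List.getElem_map, PySem.List.getElem_enumerate]
    simp [PySem.List.length_enumerate]
  apply List.ext_getElem (by rw [hAB_rowlen, hBrow_len, hGrowlen])
  intro c hc1 hc2
  have hc : c < (grid.headD []).length := by rw [hAB_rowlen] at hc1; exact hc1
  rw [← List.getD_eq_getElem _ 0 hc1, ← List.getD_eq_getElem _ 0 hc2]
  rw [pvB_getD (pvCrop grid) bg hGrect r c hGr (by rw [hHD]; exact hc)]
  rw [pvW_crop grid hgne hpre, hWeq, pvPA_crop grid bg hpre r c hc, pvAGet_crop grid hpre r c hc]
  rw [hArow, hWeq]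
  rw [pvRowFold_getD grid bg (grid.length : Int) (((grid.headD []).length : Nat) : Int) (r : Int) (grid.headD []).length _ c
      (by simpa [PySem.List.length_pyRange_one] using hc)]
  rw [if_congr (and_iff_right hc) rfl rfl]
  rw [show ((PySem.List.pyRange 0 (((grid.headD []).length : Nat) : Int) 1).map (fun _ => bg)).getD c 0 = bg from by
    rw [List.getD_eq_getElem _ _ (by simpa [PySem.List.length_pyRange_one] using hc), List.getElem_map]]
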